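-- pv_equiv track=rewrite | github.com/SemGuS-git/Semgus-Benchmarks | alpharegex/util/gen-regex-file-messy.py | indexify
-- ===== SOURCE A (Python) =====
-- def indexify(skips,start):
--     k = 0
--     ret = []
--     for i in skips:
--         a = start + k
--         k += i
--         b = start+k
--         ret.append((a,b))
--     return ret
-- ===== SOURCE B (Python) =====
-- def indexify(skips, start):
--     bounds = [start]
--     for i in skips:
--         bounds.append(bounds[-1] + i)
--     return list(zip(bounds, bounds[1:]))
-- ===== Notes on version B (the rewrite author's own statement) =====
-- stated objective: idiomatic
-- what changed: B first computes all boundary positions as a prefix-sum list, then pairs consecutive boundaries with zip, instead of A's single running-counter loop appending each pair inline.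
import Mathlib
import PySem

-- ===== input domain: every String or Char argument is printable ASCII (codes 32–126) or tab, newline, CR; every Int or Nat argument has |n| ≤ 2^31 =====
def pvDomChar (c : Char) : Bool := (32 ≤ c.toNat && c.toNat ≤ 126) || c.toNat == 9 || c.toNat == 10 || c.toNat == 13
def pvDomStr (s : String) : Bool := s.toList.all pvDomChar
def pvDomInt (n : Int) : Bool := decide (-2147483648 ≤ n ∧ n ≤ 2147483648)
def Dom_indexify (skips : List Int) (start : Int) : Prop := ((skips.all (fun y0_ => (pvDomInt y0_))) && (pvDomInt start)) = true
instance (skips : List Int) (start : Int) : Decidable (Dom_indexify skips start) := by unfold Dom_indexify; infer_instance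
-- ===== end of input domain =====

-- B computes the boundary positions first (prefix sums) and pairs consecutive
-- boundaries with zip, instead of A's running-counter loop; objective: idiomatic.

-- ===== PORT A =====
def indexify (skips : List Int) (start : Int) : List (Int × Int) :=
  (skips.foldl
    (fun (st : Int × List (Int × Int)) i =>
      let a := start + st.1
      let k := st.1 + i
      let b := start + k
      (k, st.2 ++ [(a, b)]))
    (0, [])).2

-- ===== PORT B =====
def indexify_alt (skips : List Int) (start : Int) : List (Int × Int) :=
  let bounds := skips.foldl (fun bs i => bs ++ [bs.getLastD start + i]) [start]
  bounds.zip (bounds.drop 1)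

-- ===== PRECONDITION & SPEC =====
def Spec_indexify (skips : List Int) (start : Int) (out : List (Int × Int)) : Prop := out = indexify_alt skips start
instance (skips : List Int) (start : Int) (out : List (Int × Int)) : Decidable (Spec_indexify skips start out) := by unfold Spec_indexify; infer_instance

-- ===== CLAIM (what is proved, stated in full; the proofs are below) =====
def Claim_equal_indexify : Prop := ∀ (skips : List Int) (start : Int), Dom_indexify skips start → Spec_indexify skips start (indexify skips start)

-- ===== LEMMAS AND PROOFS =====

-- ===== VERDICT (by name: the statement is the Claim_ definition above) =====
-- abstract description of the pair sequence, used to relate both loops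
def pvPairs (skips : List Int) (s : Int) : List (Int × Int) :=
  match skips with
  | [] => []
  | i :: r => (s, s + i) :: pvPairs r (s + i)

-- cut points after the first one
def pvCuts (skips : List Int) (s : Int) : List Int :=
  match skips with
  | [] => []
  | i :: r => (s + i) :: pvCuts r (s + i)

theorem loopA_eq (skips : List Int) (start k : Int) (ret : List (Int × Int)) :
    (skips.foldl
      (fun (st : Int × List (Int × Int)) i =>
        let a := start + st.1
        let k := st.1 + i
        let b := start + k
        (k, st.2 ++ [(a, b)]))
      (k, ret)).2 = ret ++ pvPairs skips (start + k) := by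
  induction skips generalizing k ret with
  | nil => simp [pvPairs]
  | cons i r ih =>
    simp only [List.foldl, pvPairs]
    rw [ih]
    simp [add_assoc]

theorem loopB_eq (skips : List Int) (start s : Int) (pre : List Int)
    (h : pre.getLastD start = s) :
    skips.foldl (fun bs i => bs ++ [bs.getLastD start + i]) pre
      = pre ++ pvCuts skips s := by
  induction skips generalizing pre s with
  | nil => simp [pvCuts]
  | cons i r ih =>
    simp only [List.foldl, pvCuts]
    rw [h, ih (s + i) (pre ++ [s + i]) List.getLastD_concat]
    simp

theorem zip_cuts (skips : List Int) (s : Int) :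
    (s :: pvCuts skips s).zip (pvCuts skips s) = pvPairs skips s := by
  induction skips generalizing s with
  | nil => simp [pvCuts, pvPairs]
  | cons i r ih => simp [pvCuts, pvPairs, ih]

theorem indexify_spec : Claim_equal_indexify := by
  intro skips start _
  unfold Spec_indexify indexify indexify_alt
  rw [loopA_eq, loopB_eq skips start start [start] (by simp)]
  simp [zip_cuts]
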